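-- pv_equiv track=rewrite | github.com/seamus52/leetcode | trapping_rain_water_naive_TLE.py | gen_map
-- ===== SOURCE A (Python) =====
-- def gen_map(height):
--     m = []
--     for r in range(max(height)):
--         m.append([])
--         for c in range(len(height)):
--             if height[c] > r:
--                 m[r].append(1)
--             else:
--                 m[r].append(0)
--
--     return m
-- ===== SOURCE B (Python) =====
-- def gen_map(height):
--     rows = max(height)
--     n = len(height)
--     m = [[0] * n for _ in range(rows)]
--     for c, h in enumerate(height):
--         for r in range(h):
--             m[r][c] = 1
--     return m
-- ===== Notes on version B (the rewrite author's own statement) =====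
-- stated objective: alternative
-- what changed: B allocates a rows x n zero grid up front and fills ones column-major (for each column c, set m[r][c]=1 for r < height[c]) instead of A's row-major build that tests height[c] > r at every cell.
import Mathlib
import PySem

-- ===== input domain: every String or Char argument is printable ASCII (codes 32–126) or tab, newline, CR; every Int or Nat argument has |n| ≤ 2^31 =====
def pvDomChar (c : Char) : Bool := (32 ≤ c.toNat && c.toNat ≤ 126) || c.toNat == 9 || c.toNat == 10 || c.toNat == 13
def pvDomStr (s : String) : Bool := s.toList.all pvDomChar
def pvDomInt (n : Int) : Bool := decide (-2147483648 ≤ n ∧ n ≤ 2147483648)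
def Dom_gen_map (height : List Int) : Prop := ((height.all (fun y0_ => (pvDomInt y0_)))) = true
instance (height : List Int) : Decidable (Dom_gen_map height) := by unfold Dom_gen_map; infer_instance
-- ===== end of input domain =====

-- B fills a zero grid column-major instead of A's per-cell comparison row-major build; same asymptotic cost.
-- ===== PORT A =====
def gen_map (height : List Int) : List (List Int) :=
  -- Pre_ requires height ≠ []: Python's max([]) raises ValueError; .getD 0 is never reached under Pre_.
  let mx := (PySem.List.max? height (fun x => x)).getD 0
  (PySem.List.pyRange 0 mx 1).foldl (fun m r =>
    m ++ [(PySem.List.pyRange 0 (PySem.List.len height) 1).foldl (fun row c =>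
      if PySem.List.pyGetD height c 0 > r then row ++ [(1 : Int)] else row ++ [(0 : Int)]) []]) []

-- ===== PORT B =====
def gen_map_alt (height : List Int) : List (List Int) :=
  let rows := (PySem.List.max? height (fun x => x)).getD 0
  let n := height.length
  let m0 := (PySem.List.pyRange 0 rows 1).map (fun _ => List.replicate n (0 : Int))
  (PySem.List.enumerate height).foldl (fun m p =>
    (PySem.List.pyRange 0 p.2 1).foldl (fun m' r =>
      PySem.List.pySetD m' r (PySem.List.pySetD (PySem.List.pyGetD m' r []) p.1 1)) m) m0

-- ===== PRECONDITION & SPEC =====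
-- Pre_ excludes only the empty list, on which Python's max(height) raises ValueError (in A and in B alike).
def Pre_gen_map (height : List Int) : Prop := height ≠ []
instance (height : List Int) : Decidable (Pre_gen_map height) := by unfold Pre_gen_map; infer_instance
def pvWitness_gen_map : List Int := [2, 0, 3, 1]
def Spec_gen_map (height : List Int) (out : List (List Int)) : Prop := out = gen_map_alt height
instance (height : List Int) (out : List (List Int)) : Decidable (Spec_gen_map height out) := by unfold Spec_gen_map; infer_instance

-- ===== CLAIM (what is proved, stated in full; the proofs are below) =====
def Claim_equal_gen_map : Prop := ∀ (height : List Int), Dom_gen_map height → Pre_gen_map height → Spec_gen_map height (gen_map height)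

-- ===== LEMMAS AND PROOFS =====

-- set on a range-indexed row table rewrites one row under the map
lemma pv_set_map_range (f : Nat → List Int) (n k : Nat) (v : List Int) :
    ((List.range n).map f).set k v = (List.range n).map (fun r => if r = k then v else f r) := by
  apply List.ext_getElem <;> simp [List.getElem_set]
  intro i hi; split <;> simp_all [eq_comm]

-- B's inner column fill, in Nat form: applies g to the first n' rows of a range-indexed grid
lemma pv_inner_fold (g : List Int → List Int) :
    ∀ (n' : Nat) (R : Nat) (rowf : Nat → List Int), n' ≤ R →
    (List.range n').foldl (fun m' k => m'.set k (g (m'.getD k []))) ((List.range R).map rowf)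
      = (List.range R).map (fun r => if r < n' then g (rowf r) else rowf r) := by
  intro n'
  induction n' with
  | zero => intro R rowf _; simp
  | succ n' ih =>
      intro R rowf hle
      rw [List.range_succ, List.foldl_append, ih R rowf (by omega)]
      simp only [List.foldl_cons, List.foldl_nil]
      rw [PySem.List.getD_map_range _ R n' [] (by omega), pv_set_map_range]
      apply List.map_congr_left
      intro r hr
      simp only [List.mem_range] at hr
      rcases lt_trichotomy r n' with h | h | h
      · rw [if_neg (by omega), if_pos h, if_pos (by omega)]
      · subst h
        rw [if_pos rfl, if_neg (by omega), if_pos (by omega)]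
      · rw [if_neg (by omega), if_neg (by omega), if_neg (by omega)]

-- B's outer fold over enumerated columns acts row-wise on a range-indexed grid
lemma pv_outer_fold :
    ∀ (tl : List Int) (R : Nat) (s : Nat) (rowf : Nat → List Int), (∀ h ∈ tl, h.toNat ≤ R) →
    (PySem.List.enumerate tl ((s : Nat) : Int)).foldl
        (fun m p => (PySem.List.pyRange 0 p.2 1).foldl
          (fun m' r => PySem.List.pySetD m' r (PySem.List.pySetD (PySem.List.pyGetD m' r []) p.1 1)) m)
        ((List.range R).map rowf)
      = (List.range R).map (fun (r : Nat) => (PySem.List.enumerate tl ((s : Nat) : Int)).foldl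
          (fun row p => if (r : Int) < p.2 then PySem.List.pySetD row p.1 1 else row) (rowf r)) := by
  intro tl
  induction tl with
  | nil => intro R s rowf _; simp [PySem.List.enumerate_nil]
  | cons h tl ih =>
      intro R s rowf hb
      simp only [PySem.List.enumerate_cons, List.foldl_cons]
      have hstep : (PySem.List.pyRange 0 h 1).foldl
          (fun m' r => PySem.List.pySetD m' r (PySem.List.pySetD (PySem.List.pyGetD m' r []) ((s : Nat) : Int) 1))
          ((List.range R).map rowf)
          = (List.range R).map (fun r => if r < h.toNat then (rowf r).set s 1 else rowf r) := by
        rw [PySem.List.pyRange_one, List.foldl_map]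
        simp only [zero_add, Int.sub_zero, PySem.List.pySetD_natCast, PySem.List.pyGetD_natCast]
        exact pv_inner_fold (fun row => row.set s 1) h.toNat R rowf (hb h (by simp))
      have hcast : ((s : Nat) : Int) + 1 = ((s + 1 : Nat) : Int) := by push_cast; ring
      simp only [hcast]
      rw [hstep, ih R (s + 1) _ (fun x hx => hb x (List.mem_cons_of_mem _ hx))]
      apply List.map_congr_left
      intro r hr
      congr 1
      by_cases hc : (r : Int) < h
      · rw [if_pos (by omega : r < h.toNat), if_pos hc, PySem.List.pySetD_natCast]
      · rw [if_neg (by omega : ¬ r < h.toNat), if_neg hc]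

-- per-row: filling ones left to right over an enumerated suffix produces the comparison row
lemma pv_row_fold (r : Int) :
    ∀ (tl : List Int) (acc : List Int),
    (PySem.List.enumerate tl ((acc.length : Nat) : Int)).foldl
        (fun row p => if r < p.2 then PySem.List.pySetD row p.1 1 else row)
        (acc ++ List.replicate tl.length 0)
      = acc ++ tl.map (fun hh => if hh > r then (1 : Int) else 0) := by
  intro tl
  induction tl with
  | nil => intro acc; simp [PySem.List.enumerate_nil]
  | cons h tl ih =>
      intro acc
      simp only [PySem.List.enumerate_cons, List.foldl_cons]
      have hrow : (if r < h then
            PySem.List.pySetD (acc ++ List.replicate (h :: tl).length 0) ((acc.length : Nat) : Int) 1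
          else acc ++ List.replicate (h :: tl).length 0)
          = (acc ++ [if h > r then (1 : Int) else 0]) ++ List.replicate tl.length 0 := by
        by_cases hc : r < h
        · rw [if_pos hc, PySem.List.pySetD_natCast]
          simp only [List.length_cons, List.replicate_succ]
          rw [List.set_append_right _ _ (le_refl _)]
          simp [hc, gt_iff_lt]
        · rw [if_neg hc]
          have hx : (if h > r then (1 : Int) else 0) = 0 := by
            rw [if_neg (by omega)]
          rw [hx]
          simp only [List.length_cons, List.replicate_succ]
          simp
      rw [hrow]
      have hcast : ((acc.length : Nat) : Int) + 1
          = (((acc ++ [if h > r then (1 : Int) else 0]).length : Nat) : Int) := by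
        simp only [List.length_append, List.length_cons, List.length_nil]
        push_cast; ring
      rw [hcast, ih (acc ++ [if h > r then (1 : Int) else 0])]
      simp

-- A's closed form
lemma pv_A_closed (height : List Int) :
    gen_map height = (List.range ((PySem.List.max? height (fun x => x)).getD 0).toNat).map
      (fun (r : Nat) => height.map (fun hh => if hh > (r : Int) then (1 : Int) else 0)) := by
  have hinner : ∀ r : Int, (PySem.List.pyRange 0 (PySem.List.len height) 1).foldl
      (fun row c => if PySem.List.pyGetD height c 0 > r then row ++ [(1 : Int)] else row ++ [(0 : Int)]) []
      = height.map (fun hh => if hh > r then (1 : Int) else 0) := by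
    intro r
    have hfun : (fun (row : List Int) (c : Int) =>
        if PySem.List.pyGetD height c 0 > r then row ++ [(1 : Int)] else row ++ [(0 : Int)])
        = fun row c => row ++ [if PySem.List.pyGetD height c 0 > r then (1 : Int) else 0] := by
      funext row c; split <;> rfl
    rw [hfun, PySem.List.foldl_append_singleton_eq_map, List.nil_append]
    conv_rhs => rw [← PySem.List.map_pyGetD_pyRange_zero height 0]
    rw [List.map_map]
    rfl
  show (PySem.List.pyRange 0 ((PySem.List.max? height (fun x => x)).getD 0) 1).foldl
      (fun m r => m ++ [(PySem.List.pyRange 0 (PySem.List.len height) 1).foldl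
        (fun row c => if PySem.List.pyGetD height c 0 > r then row ++ [(1 : Int)] else row ++ [(0 : Int)]) []]) []
      = _
  rw [PySem.List.foldl_append_singleton_eq_map, List.nil_append,
    PySem.List.pyRange_one 0 ((PySem.List.max? height (fun x => x)).getD 0), List.map_map]
  simp only [Function.comp_def, zero_add, Int.sub_zero]
  apply List.map_congr_left
  intro k _
  exact hinner (k : Int)

-- B's closed form (height nonempty so every column height fits under rows = max)
lemma pv_B_closed (height : List Int) (hne : height ≠ []) :
    gen_map_alt height = (List.range ((PySem.List.max? height (fun x => x)).getD 0).toNat).map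
      (fun (r : Nat) => height.map (fun hh => if hh > (r : Int) then (1 : Int) else 0)) := by
  obtain ⟨mx, hmx⟩ : ∃ mx, PySem.List.max? height (fun x => x) = some mx := by
    cases hm : PySem.List.max? height (fun x => x) with
    | none => exact absurd ((PySem.List.max?_eq_none_iff _ _).mp hm) hne
    | some m => exact ⟨m, rfl⟩
  have hbound : ∀ h ∈ height, h.toNat ≤ ((PySem.List.max? height (fun x => x)).getD 0).toNat := by
    intro h hh
    have := PySem.List.max?_isMax hmx h hh
    simp only [hmx, Option.getD_some]
    omega
  have hm0 : (PySem.List.pyRange 0 ((PySem.List.max? height (fun x => x)).getD 0) 1).map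
      (fun _ => List.replicate height.length (0 : Int))
      = (List.range ((PySem.List.max? height (fun x => x)).getD 0).toNat).map
        (fun _ => List.replicate height.length (0 : Int)) := by
    rw [PySem.List.pyRange_one, List.map_map]
    simp [Function.comp_def]
  show (PySem.List.enumerate height).foldl
      (fun m p => (PySem.List.pyRange 0 p.2 1).foldl
        (fun m' r => PySem.List.pySetD m' r (PySem.List.pySetD (PySem.List.pyGetD m' r []) p.1 1)) m)
      ((PySem.List.pyRange 0 ((PySem.List.max? height (fun x => x)).getD 0) 1).map
        (fun _ => List.replicate height.length (0 : Int)))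
      = _
  rw [hm0]
  have h0 := pv_outer_fold height ((PySem.List.max? height (fun x => x)).getD 0).toNat 0
    (fun _ => List.replicate height.length (0 : Int)) hbound
  rw [Nat.cast_zero] at h0
  rw [h0]
  apply List.map_congr_left
  intro r _
  have hrr := pv_row_fold (r : Int) height []
  simp only [List.length_nil, Nat.cast_zero, List.nil_append] at hrr
  exact hrr

-- ===== VERDICT (by name: the statement is the Claim_ definition above) =====
theorem gen_map_spec : Claim_equal_gen_map := by
  intro height _ hpre
  unfold Spec_gen_map
  rw [pv_A_closed, pv_B_closed height hpre]
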